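-- pv_equiv track=rewrite | github.com/cindybohyeon/Algorithm_Study | 2023/9024.py | makeResult
-- ===== SOURCE A (Python) =====
-- def makeResult(n, k, graph):
--     count = 0
--     difference = 20000000
--     start, end = 0, n-1
--     while(start < end):
--         temp = graph[start] + graph[end]
--         if (abs(temp - k) < difference):
--             count = 1
--             difference = abs(temp-k)
--             if (temp > k):
--                 end -= 1
--             elif (temp < k):
--                 start += 1
--             else: # 왜 같은경우에는 둘다 움직이는 걸까?
--                 start += 1
--                 # end -= 1
--         elif (abs(temp - k) > difference):
--             if (temp > k):
--                 end -= 1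
--             elif (temp < k):
--                 start += 1
--             else:
--                 start += 1
--                 # end -= 1
--         elif (abs(temp - k) == difference):
--             count += 1
--             if (temp > k):
--                 end -= 1
--             elif (temp < k):
--                 start += 1
--             else:
--                 start += 1
--                 # end -= 1
--
--     return count
-- ===== SOURCE B (Python) =====
-- def makeResult(n, k, graph):
--     # Pass 1: walk the two pointers, recording every visited pair-sum.
--     sums = []
--     start, end = 0, n - 1
--     while start < end:
--         s = graph[start] + graph[end]
--         sums.append(s)
--         if s > k:
--             end -= 1
--         else:
--             start += 1
--     # Pass 2: smallest |sum - k|, capped by the initial 20000000.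
--     best = 20000000
--     for s in sums:
--         d = abs(s - k)
--         if d < best:
--             best = d
--     # Pass 3: count how many visited sums achieve it.
--     return sum(1 for s in sums if abs(s - k) == best)
-- ===== Notes on version B (the rewrite author's own statement) =====
-- stated objective: alternative
-- what changed: A's interleaved count/difference state machine is replaced by a collect-then-reduce decomposition: one two-pointer pass records every visited pair-sum, then separate passes compute the capped minimum distance to k and count the sums achieving it.
import Mathlib
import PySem

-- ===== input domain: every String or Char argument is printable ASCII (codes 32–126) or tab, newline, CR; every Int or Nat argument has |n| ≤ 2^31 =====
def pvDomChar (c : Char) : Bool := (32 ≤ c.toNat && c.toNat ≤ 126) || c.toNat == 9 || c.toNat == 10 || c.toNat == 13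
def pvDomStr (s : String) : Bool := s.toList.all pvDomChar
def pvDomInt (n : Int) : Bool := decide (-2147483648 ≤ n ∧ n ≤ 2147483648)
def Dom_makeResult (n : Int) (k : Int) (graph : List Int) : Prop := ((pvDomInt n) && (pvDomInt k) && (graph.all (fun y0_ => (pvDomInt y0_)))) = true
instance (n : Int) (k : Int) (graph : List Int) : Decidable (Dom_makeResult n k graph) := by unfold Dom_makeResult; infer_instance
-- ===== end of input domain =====

-- B replaces A's interleaved count/difference state machine by collect-the-sums then reduce (min, then count); same O(n) cost, return value only.

-- ===== PORT A =====
-- A's while loop; returns `count` if an index lookup fails (Python raises there; outside Pre_).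
def aLoop (k : Int) (g : List Int) (s e cnt diff : Int) : Int :=
  if h : s < e then
    match PySem.List.pyGet? g s, PySem.List.pyGet? g e with
    | some x, some y =>
      let temp := x + y
      if |temp - k| < diff then
        if temp > k then aLoop k g s (e - 1) 1 |temp - k|
        else if temp < k then aLoop k g (s + 1) e 1 |temp - k|
        else aLoop k g (s + 1) e 1 |temp - k|
      else if |temp - k| > diff then
        if temp > k then aLoop k g s (e - 1) cnt diff
        else if temp < k then aLoop k g (s + 1) e cnt diff
        else aLoop k g (s + 1) e cnt diff
      else
        if temp > k then aLoop k g s (e - 1) (cnt + 1) diff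
        else if temp < k then aLoop k g (s + 1) e (cnt + 1) diff
        else aLoop k g (s + 1) e (cnt + 1) diff
    | _, _ => cnt
  else cnt
termination_by (e - s).toNat
decreasing_by all_goals omega

def makeResult (n : Int) (k : Int) (graph : List Int) : Int :=
  aLoop k graph 0 (n - 1) 0 20000000

-- ===== PORT B =====
-- B's pass 1: the list of visited pair-sums ([] on a failed lookup, where Python raises; outside Pre_).
def bSums (k : Int) (g : List Int) (s e : Int) : List Int :=
  if h : s < e then
    match PySem.List.pyGet? g s, PySem.List.pyGet? g e with
    | some x, some y =>
      let t := x + y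
      t :: (if t > k then bSums k g s (e - 1) else bSums k g (s + 1) e)
    | _, _ => []
  else []
termination_by (e - s).toNat
decreasing_by all_goals omega

-- B's pass-2 update: best := d if d < best.
def bestf (k : Int) (b t : Int) : Int := if |t - k| < b then |t - k| else b

def makeResult_alt (n : Int) (k : Int) (graph : List Int) : Int :=
  let sums := bSums k graph 0 (n - 1)
  let best := sums.foldl (bestf k) 20000000
  ((sums.filter (fun t => |t - k| == best)).length : Int)

-- ===== PRECONDITION & SPEC =====
-- Pre_ excludes exactly the inputs on which A raises IndexError: n ≥ 2 with graph shorter than n.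
def Pre_makeResult (n : Int) (k : Int) (graph : List Int) : Prop := n ≤ 1 ∨ n ≤ graph.length
instance (n : Int) (k : Int) (graph : List Int) : Decidable (Pre_makeResult n k graph) := by unfold Pre_makeResult; infer_instance
def pvWitness_makeResult : Int × Int × List Int := (4, 5, [1, 2, 3, 4])
def Spec_makeResult (n : Int) (k : Int) (graph : List Int) (out : Int) : Prop := out = makeResult_alt n k graph
instance (n : Int) (k : Int) (graph : List Int) (out : Int) : Decidable (Spec_makeResult n k graph out) := by unfold Spec_makeResult; infer_instance

-- ===== CLAIM (what is proved, stated in full; the proofs are below) =====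
def Claim_equal_makeResult : Prop := ∀ (n : Int) (k : Int) (graph : List Int), Dom_makeResult n k graph → Pre_makeResult n k graph → Spec_makeResult n k graph (makeResult n k graph)

-- ===== LEMMAS AND PROOFS =====

-- The step function A applies to its (count, difference) state at each visited sum.
def aStep (k : Int) (p : Int × Int) (t : Int) : Int × Int :=
  if |t - k| < p.2 then (1, |t - k|)
  else if |t - k| > p.2 then p
  else (p.1 + 1, p.2)

theorem bestf_le (k diff : Int) (l : List Int) : l.foldl (bestf k) diff ≤ diff := by
  induction l generalizing diff with
  | nil => simp
  | cons t l ih =>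
    simp only [List.foldl_cons]
    refine le_trans (ih _) ?_
    simp only [bestf]; split <;> omega

theorem aLoop_eq_foldl (k : Int) (g : List Int) :
    ∀ (m : Nat) (s e cnt diff : Int), (e - s).toNat ≤ m →
      aLoop k g s e cnt diff = ((bSums k g s e).foldl (aStep k) (cnt, diff)).1 := by
  intro m
  induction m with
  | zero =>
    intro s e cnt diff hm
    have h : ¬ s < e := by omega
    rw [aLoop, bSums]
    simp [h]
  | succ m ih =>
    intro s e cnt diff hm
    by_cases h : s < e
    · rw [aLoop, bSums]
      simp only [dif_pos h]
      cases hx : PySem.List.pyGet? g s with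
      | none => simp
      | some x =>
        cases hy : PySem.List.pyGet? g e with
        | none => simp
        | some y =>
          simp only [List.foldl_cons, aStep]
          split_ifs <;> exact ih _ _ _ _ (by omega)
    · rw [aLoop, bSums]; simp [h]

theorem foldl_aStep_count (k : Int) (l : List Int) : ∀ (cnt diff : Int),
    (l.foldl (aStep k) (cnt, diff)).1 =
      (if l.foldl (bestf k) diff < diff then 0 else cnt)
        + ((l.countP (fun t => |t - k| == l.foldl (bestf k) diff) : Int)) := by
  induction l with
  | nil => intro cnt diff; simp
  | cons t l ih =>
    intro cnt diff
    simp only [List.foldl_cons, List.countP_cons]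
    by_cases h1 : |t - k| < diff
    · have hb : bestf k diff t = |t - k| := by simp [bestf, h1]
      have hs : aStep k (cnt, diff) t = (1, |t - k|) := by simp [aStep, h1]
      rw [hs]; simp only [hb]; rw [ih]
      have hle : l.foldl (bestf k) |t - k| ≤ |t - k| := bestf_le k |t - k| l
      have hltd : l.foldl (bestf k) |t - k| < diff := by omega
      rw [if_pos hltd]
      by_cases h2 : l.foldl (bestf k) |t - k| < |t - k|
      · rw [if_pos h2]
        have hne : (|t - k| == l.foldl (bestf k) |t - k|) = false := by
          simp only [beq_eq_false_iff_ne, ne_eq]; omega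
        rw [hne]; simp
      · have hy : (|t - k| == l.foldl (bestf k) |t - k|) = true := by
          simp only [beq_iff_eq]; omega
        rw [if_neg h2, hy]
        simp; omega
    · have hb : bestf k diff t = diff := by simp [bestf, h1]
      have hle : l.foldl (bestf k) diff ≤ diff := bestf_le k diff l
      by_cases h2 : |t - k| > diff
      · have hs : aStep k (cnt, diff) t = (cnt, diff) := by simp [aStep, h1, h2]
        rw [hs]; simp only [hb]; rw [ih]
        have hne : (|t - k| == l.foldl (bestf k) diff) = false := by
          simp only [beq_eq_false_iff_ne, ne_eq]; omega
        rw [hne]; simp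
      · have hs : aStep k (cnt, diff) t = (cnt + 1, diff) := by simp [aStep, h1, h2]
        rw [hs]; simp only [hb]; rw [ih]
        by_cases h3 : l.foldl (bestf k) diff < diff
        · have hne : (|t - k| == l.foldl (bestf k) diff) = false := by
            simp only [beq_eq_false_iff_ne, ne_eq]; omega
          rw [if_pos h3, if_pos h3, hne]; simp
        · have hy : (|t - k| == l.foldl (bestf k) diff) = true := by
            simp only [beq_iff_eq]; omega
          rw [if_neg h3, if_neg h3, hy]
          simp; omega

-- ===== VERDICT (by name: the statement is the Claim_ definition above) =====
theorem makeResult_spec : Claim_equal_makeResult := by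
  intro n k graph _ _
  unfold Spec_makeResult makeResult makeResult_alt
  rw [aLoop_eq_foldl k graph (n - 1 - 0).toNat 0 (n - 1) 0 20000000 le_rfl,
      foldl_aStep_count]
  simp [List.countP_eq_length_filter]
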